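-- pv_equiv track=rewrite | github.com/eliottcassidy2000/math | 04-computation/disj3_c5_theorem.py | overlap_counts
-- ===== SOURCE A (Python) =====
-- from collections import defaultdict
--
-- def overlap_counts(cycle_sets):
--     n = len(cycle_sets)
--     ov = defaultdict(int)
--     for i in range(n):
--         for j in range(i+1, n):
--             o = len(cycle_sets[i] & cycle_sets[j])
--             ov[o] += 1
--     return ov
-- ===== SOURCE B (Python) =====
-- from collections import Counter
-- from itertools import combinations
--
--
-- def _merge_count(a, b):
--     # a, b sorted lists; number of common elements via two-pointer merge
--     i = j = c = 0
--     while i < len(a) and j < len(b):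
--         if a[i] < b[j]:
--             i += 1
--         elif b[j] < a[i]:
--             j += 1
--         else:
--             c += 1
--             i += 1
--             j += 1
--     return c
--
--
-- def overlap_counts(cycle_sets):
--     rows = [sorted(s) for s in cycle_sets]
--     return Counter(_merge_count(a, b) for a, b in combinations(rows, 2))
-- ===== Notes on version B (the rewrite author's own statement) =====
-- stated objective: alternative
-- what changed: B replaces the hash-set intersections inside nested index loops by sorting each set once and counting each pair's common elements with a two-pointer merge over itertools.combinations, tallying sizes with a single Counter instead of defaultdict increments.
import Mathlib
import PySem

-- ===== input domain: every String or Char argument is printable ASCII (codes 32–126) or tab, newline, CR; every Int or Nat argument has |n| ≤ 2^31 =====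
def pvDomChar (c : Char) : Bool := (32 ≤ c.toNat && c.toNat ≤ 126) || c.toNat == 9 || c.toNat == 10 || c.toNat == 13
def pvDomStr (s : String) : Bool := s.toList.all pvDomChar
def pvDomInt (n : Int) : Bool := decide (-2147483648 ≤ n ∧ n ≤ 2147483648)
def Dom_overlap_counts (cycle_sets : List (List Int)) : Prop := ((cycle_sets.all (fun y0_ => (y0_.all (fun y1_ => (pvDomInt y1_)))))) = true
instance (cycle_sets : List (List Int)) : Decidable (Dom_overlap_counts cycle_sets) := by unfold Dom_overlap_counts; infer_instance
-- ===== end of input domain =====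

-- B replaces A's per-pair hash-set intersections by sorting each set once and counting
-- common elements with a two-pointer merge, tallying all sizes with one Counter (objective:
-- alternative algorithm, similar cost).

-- ===== PORT A =====
-- len(cycle_sets[i] & cycle_sets[j]) : inner lists encode Python sets (distinct elements),
-- so the intersection size is the number of elements of the first list lying in the second.
def overlap_counts (cycle_sets : List (List Int)) : List (Int × Int) :=
  let n : Int := cycle_sets.length
  let ov : PySem.Dict Int Int :=
    (PySem.List.pyRange 0 n 1).foldl (fun ov i =>
      (PySem.List.pyRange (i + 1) n 1).foldl (fun ov j =>
        let o : Int := ((PySem.List.pyGetD cycle_sets i []).filter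
            (fun x => decide (x ∈ PySem.List.pyGetD cycle_sets j []))).length
        ov.modify o 0 (· + 1)) ov) PySem.Dict.empty
  ov.items

-- ===== PORT B =====
-- two-pointer merge count over two sorted lists (Source B's _merge_count)
def pvMergeCount : List Int → List Int → Int
  | x :: xs, y :: ys =>
      if x < y then pvMergeCount xs (y :: ys)
      else if y < x then pvMergeCount (x :: xs) ys
      else 1 + pvMergeCount xs ys
  | _, _ => 0

-- itertools.combinations(rows, 2) in order
def pvPairs {α : Type} : List α → List (α × α)
  | [] => []
  | x :: xs => xs.map (fun y => (x, y)) ++ pvPairs xs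

def overlap_counts_alt (cycle_sets : List (List Int)) : List (Int × Int) :=
  let rows := cycle_sets.map (fun s => PySem.List.sorted s (fun x => x) false)
  (PySem.Dict.counter ((pvPairs rows).map (fun p => pvMergeCount p.1 p.2))).items

-- ===== PRECONDITION & SPEC =====
-- Pre_ only states that each inner list encodes a Python set (distinct elements), the type
-- convention's representation of A's set arguments; it excludes no input A accepts.
def Pre_overlap_counts (cycle_sets : List (List Int)) : Prop :=
  ∀ s ∈ cycle_sets, s.Nodup
instance (cycle_sets : List (List Int)) : Decidable (Pre_overlap_counts cycle_sets) := by
  unfold Pre_overlap_counts; infer_instance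

def pvWitness_overlap_counts : List (List Int) := [[1, 2], [2, 3], [4]]

def Spec_overlap_counts (cycle_sets : List (List Int)) (out : List (Int × Int)) : Prop := out = overlap_counts_alt cycle_sets
instance (cycle_sets : List (List Int)) (out : List (Int × Int)) : Decidable (Spec_overlap_counts cycle_sets out) := by unfold Spec_overlap_counts; infer_instance

-- ===== CLAIM (what is proved, stated in full; the proofs are below) =====
def Claim_equal_overlap_counts : Prop := ∀ (cycle_sets : List (List Int)), Dom_overlap_counts cycle_sets → Pre_overlap_counts cycle_sets → Spec_overlap_counts cycle_sets (overlap_counts cycle_sets)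

-- ===== LEMMAS AND PROOFS =====

-- nested loop = fold over the flattened value sequence
theorem pv_nested {α β γ δ : Type} (l : List α) (g : α → List β) (v : α → β → δ)
    (step : γ → δ → γ) (init : γ) :
    l.foldl (fun d i => (g i).foldl (fun d j => step d (v i j)) d) init
      = (l.flatMap (fun i => (g i).map (v i))).foldl step init := by
  induction l generalizing init with
  | nil => rfl
  | cons x xs ih => simp [List.flatMap_cons, List.foldl_append, List.foldl_map, ih]

theorem pv_map_range_getD {α : Type} (l : List α) (x0 : α) :
    (List.range l.length).map (fun k => l.getD k x0) = l := by
  apply List.ext_getElem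
  · simp
  · intro i h1 h2
    simp [List.getD_eq_getElem?_getD, List.getElem?_eq_getElem h2]

-- index form of the pair sequence
theorem pv_core {α β : Type} (x0 : α) (g : α → α → β) (cs : List α) :
    (List.range cs.length).flatMap (fun k =>
      (List.range (cs.length - (k + 1))).map (fun m => g (cs.getD k x0) (cs.getD (k + 1 + m) x0)))
    = (pvPairs cs).map (fun p => g p.1 p.2) := by
  induction cs with
  | nil => rfl
  | cons c t ih =>
    rw [List.length_cons, List.range_succ_eq_map, List.flatMap_cons, List.flatMap_map]
    have h1 : (List.range (t.length + 1 - (0 + 1))).map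
        (fun m => g ((c :: t).getD 0 x0) ((c :: t).getD (0 + 1 + m) x0))
        = t.map (fun y => g c y) := by
      have := pv_map_range_getD t x0
      simp only [Nat.add_sub_cancel, List.getD_cons_zero, Nat.zero_add]
      calc (List.range t.length).map (fun m => g c ((c :: t).getD (1 + m) x0))
          = ((List.range t.length).map (fun m => t.getD m x0)).map (fun y => g c y) := by
            rw [List.map_map]; apply List.map_congr_left; intro m _
            simp [Nat.add_comm 1 m]
        _ = t.map (fun y => g c y) := by rw [this]
    have h2 : (List.range t.length).flatMap (fun k =>
        (List.range (t.length + 1 - (k + 1 + 1))).map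
          (fun m => g ((c :: t).getD (k + 1) x0) ((c :: t).getD (k + 1 + 1 + m) x0)))
        = (pvPairs t).map (fun p => g p.1 p.2) := by
      rw [← ih]; apply List.flatMap_congr; intro k _
      have hs : t.length + 1 - (k + 1 + 1) = t.length - (k + 1) := by omega
      rw [hs]; apply List.map_congr_left; intro m _
      have e1 : (c :: t).getD (k + 1) x0 = t.getD k x0 := List.getD_cons_succ ..
      have e2 : (c :: t).getD (k + 1 + 1 + m) x0 = t.getD (k + 1 + m) x0 := by
        have : k + 1 + 1 + m = (k + 1 + m) + 1 := by omega
        rw [this, List.getD_cons_succ]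
      rw [e1, e2]
    rw [h1, h2, pvPairs, List.map_append, List.map_map]
    rfl

theorem pv_pairs_map {α β : Type} (f : α → β) (l : List α) :
    pvPairs (l.map f) = (pvPairs l).map (fun p => (f p.1, f p.2)) := by
  induction l with
  | nil => rfl
  | cons x xs ih => simp [pvPairs, ih, List.map_map]

theorem pv_mem_pairs {α : Type} {p : α × α} {l : List α} (h : p ∈ pvPairs l) :
    p.1 ∈ l ∧ p.2 ∈ l := by
  induction l with
  | nil => simp [pvPairs] at h
  | cons x xs ih =>
    simp only [pvPairs, List.mem_append, List.mem_map] at h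
    rcases h with ⟨y, hy, he⟩ | h
    · subst he; exact ⟨List.mem_cons_self .., List.mem_cons_of_mem _ hy⟩
    · exact ⟨List.mem_cons_of_mem _ (ih h).1, List.mem_cons_of_mem _ (ih h).2⟩

-- dropping a head smaller than every element of the filtered list
theorem pv_filter_mem_cons (y : Int) (l zs : List Int) (h : ∀ z ∈ zs, y < z) :
    zs.filter (fun z => decide (z ∈ y :: l)) = zs.filter (fun z => decide (z ∈ l)) := by
  apply List.filter_congr; intro z hz
  have hyz := h z hz
  simp only [decide_eq_decide, List.mem_cons]
  constructor
  · rintro (h' | h')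
    · omega
    · exact h'
  · exact Or.inr

-- merge count on strictly increasing lists = intersection size
theorem pv_mergeCount_spec : ∀ (xs ys : List Int), xs.Pairwise (· < ·) → ys.Pairwise (· < ·) →
    pvMergeCount xs ys = ((xs.filter (fun x => decide (x ∈ ys))).length : Int) := by
  intro xs ys hx hy
  fun_induction pvMergeCount xs ys with
  | case1 x xs y ys hlt ih =>
    rw [List.pairwise_cons] at hx
    have hnm : x ∉ y :: ys := by
      intro hm
      rcases List.mem_cons.mp hm with rfl | hm
      · omega
      · exact absurd hlt (by have := (List.pairwise_cons.mp hy).1 x hm; omega)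
    rw [ih hx.2 hy, List.filter_cons_of_neg (by simpa using hnm)]
  | case2 x xs y ys hnlt hlt ih =>
    rw [List.pairwise_cons] at hy
    rw [ih hx hy.2]
    have hall : ∀ z ∈ x :: xs, y < z := by
      intro z hz
      rcases List.mem_cons.mp hz with rfl | hm
      · omega
      · have := (List.pairwise_cons.mp hx).1 z hm; omega
    rw [pv_filter_mem_cons y ys (x :: xs) hall]
  | case3 x xs y ys h1 h2 ih =>
    have hxy : x = y := by omega
    subst hxy
    rw [List.pairwise_cons] at hx hy
    rw [ih hx.2 hy.2, List.filter_cons_of_pos (by simp),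
      pv_filter_mem_cons x ys xs hx.1]
    simp only [List.length_cons]
    push_cast
    ring
  | case4 xs ys h =>
    match xs, ys with
    | [], _ => simp
    | x :: xs, [] => simp
    | x :: xs, y :: ys => exact absurd rfl (h x xs y ys rfl)

theorem pv_sorted_strict (l : List Int) (h : l.Nodup) :
    (PySem.List.sorted l (fun x => x) false).Pairwise (· < ·) := by
  have hp : (PySem.List.sorted l (fun x => x) false).Pairwise (· ≤ ·) := by
    have := PySem.List.sorted_pairwise l (fun x => x)
    simpa using this
  have hn : (PySem.List.sorted l (fun x => x) false).Nodup :=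
    (PySem.List.sorted_perm l (fun x => x) false).nodup_iff.mpr h
  exact (hp.and hn).imp (fun h => lt_of_le_of_ne h.1 h.2)

-- the per-pair value B computes equals the one A computes
theorem pv_pair_value (a b : List Int) (ha : a.Nodup) (hb : b.Nodup) :
    pvMergeCount (PySem.List.sorted a (fun x => x) false) (PySem.List.sorted b (fun x => x) false)
    = ((a.filter (fun x => decide (x ∈ b))).length : Int) := by
  rw [pv_mergeCount_spec _ _ (pv_sorted_strict a ha) (pv_sorted_strict b hb)]
  congr 1
  have hmem : ((PySem.List.sorted a (fun x => x) false).filter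
      (fun x => decide (x ∈ PySem.List.sorted b (fun x => x) false)))
      = ((PySem.List.sorted a (fun x => x) false).filter (fun x => decide (x ∈ b))) := by
    apply List.filter_congr; intro z _
    simp [PySem.List.mem_sorted]
  rw [hmem]
  exact ((PySem.List.sorted_perm a (fun x => x) false).filter _).length_eq

-- ===== VERDICT (by name: the statement is the Claim_ definition above) =====
theorem overlap_counts_spec : Claim_equal_overlap_counts := by
  intro cs _ hpre
  unfold Spec_overlap_counts overlap_counts overlap_counts_alt
  simp only []
  have h1 := pv_nested (PySem.List.pyRange 0 (cs.length : Int) 1)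
      (fun i => PySem.List.pyRange (i + 1) (cs.length : Int) 1)
      (fun i j => (((PySem.List.pyGetD cs i []).filter
        (fun x => decide (x ∈ PySem.List.pyGetD cs j []))).length : Int))
      (fun (d : PySem.Dict Int Int) (o : Int) => d.modify o 0 (fun x => x + 1)) PySem.Dict.empty
  refine (congrArg PySem.Dict.items h1).trans ?_
  rw [PySem.Dict.counter_eq_foldl]
  suffices hls : (PySem.List.pyRange 0 (cs.length : Int) 1).flatMap (fun i =>
      (PySem.List.pyRange (i + 1) (cs.length : Int) 1).map (fun j =>
        (((PySem.List.pyGetD cs i []).filter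
          (fun x => decide (x ∈ PySem.List.pyGetD cs j []))).length : Int)))
      = (pvPairs (cs.map (fun s => PySem.List.sorted s (fun x => x) false))).map
          (fun p => pvMergeCount p.1 p.2) by rw [hls]
  rw [PySem.List.pyRange_zero_nat, List.flatMap_map, pv_pairs_map, List.map_map]
  have hR : (pvPairs cs).map ((fun (p : List Int × List Int) => pvMergeCount p.1 p.2) ∘
      (fun p => (PySem.List.sorted p.1 (fun x => x) false, PySem.List.sorted p.2 (fun x => x) false)))
      = (pvPairs cs).map (fun p => ((p.1.filter (fun x => decide (x ∈ p.2))).length : Int)) := by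
    apply List.map_congr_left; intro p hp
    obtain ⟨h1, h2⟩ := pv_mem_pairs hp
    exact pv_pair_value _ _ (hpre _ h1) (hpre _ h2)
  rw [hR, ← pv_core ([] : List Int)
    (fun a b => ((a.filter (fun x => decide (x ∈ b))).length : Int)) cs]
  apply List.flatMap_congr; intro k hk
  have hk' : k < cs.length := List.mem_range.mp hk
  rw [PySem.List.pyRange_one, List.map_map]
  have hlen : ((cs.length : Int) - ((k : Int) + 1)).toNat = cs.length - (k + 1) := by omega
  rw [hlen]
  apply List.map_congr_left; intro m hm
  have e1 : PySem.List.pyGetD cs ((k : Nat) : Int) [] = cs.getD k [] :=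
    PySem.List.pyGetD_natCast ..
  have e2 : PySem.List.pyGetD cs ((k : Int) + 1 + (m : Int)) [] = cs.getD (k + 1 + m) [] := by
    have hc : ((k : Int) + 1 + (m : Int)) = ((k + 1 + m : Nat) : Int) := by push_cast; ring
    rw [hc, PySem.List.pyGetD_natCast]
  simp only [Function.comp]
  rw [e1, e2]
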